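-- pv_equiv track=rewrite | github.com/kh277/BOJ | 백준/Gold/2447. 별 찍기 － 10/별 찍기 － 10.py | solve
-- ===== SOURCE A (Python) =====
-- def solve(N):
--     grid = [['*' for _ in range(N)] for _ in range(N)]
--
--     cur = N
--     while cur > 1:
--         for y in range(N):
--             for x in range(N):
--                 if grid[y][x] == '*' and (y % cur == 1 and x % cur == 1) or ((y // cur) % 3 == 1 and (x // cur) % 3 == 1):
--                     grid[y][x] = ' '
--         cur //= 3
--
--     return grid
-- ===== SOURCE B (Python) =====
-- def solve(N):
--     # Precompute, per coordinate t, bitmasks over the chain of block sizes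
--     # (floor-dividing N by three while the value stays above one): bit i of pmask[t] says t % curs[i] == 1,
--     # bit i of qmask[t] says (t // curs[i]) % 3 == 1.  A cell (y, x) is blank
--     # iff some chain level makes both coordinates satisfy the same predicate,
--     # i.e. iff (pmask[y] & pmask[x]) | (qmask[y] & qmask[x]) is nonzero.
--     curs = []
--     c = N
--     while c > 1:
--         curs.append(c)
--         c //= 3
--     pmask = []
--     qmask = []
--     for t in range(N):
--         p = 0
--         q = 0
--         for i, c in enumerate(curs):
--             if t % c == 1:
--                 p |= 1 << i
--             if (t // c) % 3 == 1:
--                 q |= 1 << i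
--         pmask.append(p)
--         qmask.append(q)
--     return [[' ' if (pmask[y] & pmask[x]) | (qmask[y] & qmask[x]) else '*'
--              for x in range(N)] for y in range(N)]
-- ===== Notes on version B (the rewrite author's own statement) =====
-- stated objective: faster
-- what changed: Instead of A's repeated whole-grid blanking passes (one quadratic pass, with per-cell divisions, for each value of the chain obtained by floor-dividing N by three until it reaches one), B precomputes for every coordinate two bitmasks over that chain and decides each cell once with two bitwise ANDs of the row/column masks.
import Mathlib
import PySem

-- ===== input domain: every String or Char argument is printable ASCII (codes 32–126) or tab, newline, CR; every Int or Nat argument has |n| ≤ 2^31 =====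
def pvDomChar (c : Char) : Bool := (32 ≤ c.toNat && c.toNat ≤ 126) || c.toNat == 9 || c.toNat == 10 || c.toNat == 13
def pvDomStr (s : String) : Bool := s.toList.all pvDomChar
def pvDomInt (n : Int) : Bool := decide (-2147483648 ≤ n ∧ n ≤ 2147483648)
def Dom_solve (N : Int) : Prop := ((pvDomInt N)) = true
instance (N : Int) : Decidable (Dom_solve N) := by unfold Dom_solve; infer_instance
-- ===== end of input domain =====

-- B replaces A's repeated whole-grid blanking passes (one pass per value of the chain that
-- floor-divides N by three down to one) by per-coordinate bitmasks over that chain, deciding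
-- each cell once with two bitwise ANDs; objective: faster (measured in a timing run).

-- termination helper for the `while cur > 1: … cur //= 3` loops of both ports
theorem pv_fdiv3_toNat_lt (c : Int) (h : 1 < c) : (PySem.Int.floordiv c 3).toNat < c.toNat := by
  rw [PySem.Int.floordiv_eq_ediv_of_pos (by norm_num)]
  omega

-- ===== PORT A =====
-- grid[y][x]; exact here: A only indexes with y, x from range(N), always in bounds
def pvGridGet (g : List (List String)) (y x : Nat) : String := (g.getD y []).getD x ""

-- body of A's inner `for x in range(N)` loop (grid is the fold state)
def pvInner (cur : Int) (y : Nat) (g : List (List String)) (x : Nat) : List (List String) :=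
  if ((pvGridGet g y x == "*" && (PySem.Int.mod (y : Int) cur == 1 && PySem.Int.mod (x : Int) cur == 1))
      || (PySem.Int.mod (PySem.Int.floordiv (y : Int) cur) 3 == 1
          && PySem.Int.mod (PySem.Int.floordiv (x : Int) cur) 3 == 1)) then
    g.modify y (fun row => row.set x " ")
  else g

-- one full pass of A's nested for-loops for a given cur
def pvPass (n : Nat) (cur : Int) (g : List (List String)) : List (List String) :=
  (List.range n).foldl (fun g y => (List.range n).foldl (pvInner cur y) g) g

-- A's `while cur > 1` loop
def pvLoop (n : Nat) (cur : Int) (g : List (List String)) : List (List String) :=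
  if h : 1 < cur then pvLoop n (PySem.Int.floordiv cur 3) (pvPass n cur g) else g
termination_by cur.toNat
decreasing_by exact pv_fdiv3_toNat_lt cur h

def solve (N : Int) : List (List String) :=
  pvLoop N.toNat N ((List.range N.toNat).map (fun _ => (List.range N.toNat).map (fun _ => "*")))

-- ===== PORT B =====
-- B's `while c > 1: curs.append(c); c //= 3`
def pvChain (c : Int) : List Int :=
  if h : 1 < c then c :: pvChain (PySem.Int.floordiv c 3) else []
termination_by c.toNat
decreasing_by exact pv_fdiv3_toNat_lt c h

-- body of B's `for i, c in enumerate(curs)` loop; i ≥ 0, so `1 << i` is `1 <<< i.toNat`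
def pvMaskStep (t : Int) (pq : Nat × Nat) (ic : Int × Int) : Nat × Nat :=
  ((if PySem.Int.mod t ic.2 == 1 then pq.1 ||| (1 <<< ic.1.toNat) else pq.1),
   (if PySem.Int.mod (PySem.Int.floordiv t ic.2) 3 == 1 then pq.2 ||| (1 <<< ic.1.toNat) else pq.2))

-- the (p, q) bitmask pair B computes for one coordinate t
def pvMasks (curs : List Int) (t : Int) : Nat × Nat :=
  (PySem.List.enumerate curs 0).foldl (pvMaskStep t) (0, 0)

def solve_alt (N : Int) : List (List String) :=
  let curs := pvChain N
  let masks := (List.range N.toNat).map (fun (t : Nat) => pvMasks curs (t : Int))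
  (List.range N.toNat).map (fun y =>
    (List.range N.toNat).map (fun x =>
      if ((masks.getD y (0, 0)).1 &&& (masks.getD x (0, 0)).1)
         ||| ((masks.getD y (0, 0)).2 &&& (masks.getD x (0, 0)).2) ≠ 0 then " " else "*"))

-- ===== PRECONDITION & SPEC =====
def Spec_solve (N : Int) (out : List (List String)) : Prop := out = solve_alt N
instance (N : Int) (out : List (List String)) : Decidable (Spec_solve N out) := by unfold Spec_solve; infer_instance

-- ===== CLAIM (what is proved, stated in full; the proofs are below) =====
def Claim_equal_solve : Prop := ∀ (N : Int), Dom_solve N → Spec_solve N (solve N)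

-- ===== LEMMAS AND PROOFS =====

-- the per-level blanking predicates, and the cell predicate both ports compute
def pvP (t c : Int) : Bool := PySem.Int.mod t c == 1
def pvQ (t c : Int) : Bool := PySem.Int.mod (PySem.Int.floordiv t c) 3 == 1
def pvBC (c : Int) (y x : Nat) : Bool := (pvP (y : Int) c && pvP (x : Int) c) || (pvQ (y : Int) c && pvQ (x : Int) c)
def pvBlank (N : Int) (y x : Nat) : Bool := (pvChain N).any (fun c => pvBC c y x)
def pvMk (N : Int) : List (List String) :=
  (List.range N.toNat).map (fun y => (List.range N.toNat).map (fun x => if pvBlank N y x then " " else "*"))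

-- ---- B side ----

def pvIdxHit (cs : List Int) (k i : Nat) (f : Int → Bool) : Bool :=
  decide (k ≤ i) && (cs[i - k]?.elim false f)

theorem pvMaskFold_testBit (t : Int) (cs : List Int) : ∀ (k p q i : Nat),
    (((PySem.List.enumerate cs (k : Int)).foldl (pvMaskStep t) (p, q)).1.testBit i
       = (p.testBit i || pvIdxHit cs k i (pvP t)))
    ∧ (((PySem.List.enumerate cs (k : Int)).foldl (pvMaskStep t) (p, q)).2.testBit i
       = (q.testBit i || pvIdxHit cs k i (pvQ t))) := by
  induction cs with
  | nil => intro k p q i; simp [pvIdxHit]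
  | cons c cs ih =>
    intro k p q i
    rw [PySem.List.enumerate_cons]
    have hk1 : (k : Int) + 1 = ((k + 1 : Nat) : Int) := by push_cast; ring
    simp only [List.foldl_cons, hk1]
    have hstep : pvMaskStep t (p, q) ((k : Int), c)
        = ((if pvP t c then p ||| (1 <<< k) else p), (if pvQ t c then q ||| (1 <<< k) else q)) := by
      simp [pvMaskStep, pvP, pvQ]
    rw [hstep]
    obtain ⟨ih1, ih2⟩ := ih (k + 1) (if pvP t c then p ||| (1 <<< k) else p)
      (if pvQ t c then q ||| (1 <<< k) else q) i
    rw [ih1, ih2]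
    constructor
    · -- first component
      rcases Nat.lt_trichotomy i k with hik | hik | hik
      · have h1 : pvIdxHit (c :: cs) k i (pvP t) = false := by
          simp [pvIdxHit, Nat.not_le.mpr hik]
        have h2 : pvIdxHit cs (k + 1) i (pvP t) = false := by
          simp [pvIdxHit]; omega
        rw [h1, h2]
        by_cases hp : pvP t c
        · simp [hp, Nat.testBit_or, Nat.one_shiftLeft, Nat.testBit_two_pow, Nat.ne_of_gt hik]
        · simp [hp]
      · subst hik
        have h2 : pvIdxHit cs (i + 1) i (pvP t) = false := by
          simp [pvIdxHit]
        have h1 : pvIdxHit (c :: cs) i i (pvP t) = pvP t c := by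
          simp [pvIdxHit]
        rw [h1, h2]
        by_cases hp : pvP t c
        · simp [hp, Nat.testBit_or, Nat.one_shiftLeft, Nat.testBit_two_pow]
        · simp [hp]
      · have hsub : i - k = (i - (k + 1)) + 1 := by omega
        have h1 : pvIdxHit (c :: cs) k i (pvP t) = pvIdxHit cs (k + 1) i (pvP t) := by
          simp only [pvIdxHit, hsub, List.getElem?_cons_succ]
          have : (decide (k ≤ i)) = true := by simp; omega
          have h2 : (decide (k + 1 ≤ i)) = true := by simp; omega
          rw [this, h2]
        rw [h1]
        by_cases hp : pvP t c
        · simp [hp, Nat.testBit_or, Nat.one_shiftLeft, Nat.testBit_two_pow, Nat.ne_of_lt hik]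
        · simp [hp]
    · -- second component, symmetric
      rcases Nat.lt_trichotomy i k with hik | hik | hik
      · have h1 : pvIdxHit (c :: cs) k i (pvQ t) = false := by
          simp [pvIdxHit, Nat.not_le.mpr hik]
        have h2 : pvIdxHit cs (k + 1) i (pvQ t) = false := by
          simp [pvIdxHit]; omega
        rw [h1, h2]
        by_cases hp : pvQ t c
        · simp [hp, Nat.testBit_or, Nat.one_shiftLeft, Nat.testBit_two_pow, Nat.ne_of_gt hik]
        · simp [hp]
      · subst hik
        have h2 : pvIdxHit cs (i + 1) i (pvQ t) = false := by
          simp [pvIdxHit]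
        have h1 : pvIdxHit (c :: cs) i i (pvQ t) = pvQ t c := by
          simp [pvIdxHit]
        rw [h1, h2]
        by_cases hp : pvQ t c
        · simp [hp, Nat.testBit_or, Nat.one_shiftLeft, Nat.testBit_two_pow]
        · simp [hp]
      · have hsub : i - k = (i - (k + 1)) + 1 := by omega
        have h1 : pvIdxHit (c :: cs) k i (pvQ t) = pvIdxHit cs (k + 1) i (pvQ t) := by
          simp only [pvIdxHit, hsub, List.getElem?_cons_succ]
          have : (decide (k ≤ i)) = true := by simp; omega
          have h2 : (decide (k + 1 ≤ i)) = true := by simp; omega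
          rw [this, h2]
        rw [h1]
        by_cases hp : pvQ t c
        · simp [hp, Nat.testBit_or, Nat.one_shiftLeft, Nat.testBit_two_pow, Nat.ne_of_lt hik]
        · simp [hp]

theorem pvMasks_testBit_fst (cs : List Int) (t : Int) (i : Nat) :
    (pvMasks cs t).1.testBit i = cs[i]?.elim false (pvP t) := by
  have := (pvMaskFold_testBit t cs 0 0 0 i).1
  simpa [pvMasks, pvIdxHit] using this

theorem pvMasks_testBit_snd (cs : List Int) (t : Int) (i : Nat) :
    (pvMasks cs t).2.testBit i = cs[i]?.elim false (pvQ t) := by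
  have := (pvMaskFold_testBit t cs 0 0 0 i).2
  simpa [pvMasks, pvIdxHit] using this

theorem pv_ne_zero_iff (n : Nat) : n ≠ 0 ↔ ∃ i, n.testBit i := by
  constructor
  · intro h
    by_contra hc
    push_neg at hc
    exact h (Nat.eq_of_testBit_eq (fun i => by simp [Bool.eq_false_iff.mpr (hc i)]))
  · rintro ⟨i, hi⟩ rfl
    simp at hi

theorem pv_land_iff (m₁ m₂ : Nat) (cs : List Int) (f g : Int → Bool)
    (h₁ : ∀ i, m₁.testBit i = cs[i]?.elim false f)
    (h₂ : ∀ i, m₂.testBit i = cs[i]?.elim false g) :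
    (m₁ &&& m₂ ≠ 0) ↔ ∃ c ∈ cs, f c ∧ g c := by
  rw [pv_ne_zero_iff]
  constructor
  · rintro ⟨i, hi⟩
    rw [Nat.testBit_land, h₁, h₂] at hi
    cases hcs : cs[i]? with
    | none => simp [hcs] at hi
    | some c =>
      refine ⟨c, List.mem_of_getElem? hcs, ?_⟩
      simp [hcs] at hi
      exact ⟨hi.1, hi.2⟩
  · rintro ⟨c, hc, hf, hg⟩
    obtain ⟨i, hi⟩ := List.getElem?_of_mem hc
    exact ⟨i, by rw [Nat.testBit_land, h₁, h₂, hi]; simp [hf, hg]⟩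

theorem pv_or_eq_zero (u v : Nat) : (u ||| v) = 0 ↔ u = 0 ∧ v = 0 := by
  constructor
  · intro h
    constructor <;>
      refine Nat.eq_of_testBit_eq (fun i => ?_) <;>
      · have : (u ||| v).testBit i = (0 : Nat).testBit i := by rw [h]
        rw [Nat.testBit_or] at this
        simp at this ⊢
        simp [this.1, this.2]
  · rintro ⟨rfl, rfl⟩; simp

theorem pv_getD_map_range {α : Type} (n : Nat) (f : Nat → α) (d : α) (i : Nat) (h : i < n) :
    ((List.range n).map f).getD i d = f i := by
  rw [List.getD_eq_getElem?_getD]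
  simp [List.getElem?_map, List.getElem?_range, h]

theorem solve_alt_eq_mk (N : Int) : solve_alt N = pvMk N := by
  unfold solve_alt pvMk
  apply List.map_congr_left
  intro y hy
  rw [List.mem_range] at hy
  apply List.map_congr_left
  intro x hx
  rw [List.mem_range] at hx
  rw [pv_getD_map_range _ _ _ _ hy, pv_getD_map_range _ _ _ _ hx]
  have hcond :
      (((pvMasks (pvChain N) (y : Int)).1 &&& (pvMasks (pvChain N) (x : Int)).1)
        ||| ((pvMasks (pvChain N) (y : Int)).2 &&& (pvMasks (pvChain N) (x : Int)).2) ≠ 0)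
      ↔ pvBlank N y x = true := by
    rw [Ne, pv_or_eq_zero, not_and_or, ← Ne, ← Ne]
    rw [pv_land_iff _ _ _ _ _ (pvMasks_testBit_fst _ _) (pvMasks_testBit_fst _ _),
        pv_land_iff _ _ _ _ _ (pvMasks_testBit_snd _ _) (pvMasks_testBit_snd _ _)]
    simp only [pvBlank, List.any_eq_true, pvBC, Bool.or_eq_true, Bool.and_eq_true]
    constructor
    · rintro (⟨c, hc, h1, h2⟩ | ⟨c, hc, h1, h2⟩)
      · exact ⟨c, hc, Or.inl ⟨h1, h2⟩⟩
      · exact ⟨c, hc, Or.inr ⟨h1, h2⟩⟩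
    · rintro ⟨c, hc, ⟨h1, h2⟩ | ⟨h1, h2⟩⟩
      · exact Or.inl ⟨c, hc, h1, h2⟩
      · exact Or.inr ⟨c, hc, h1, h2⟩
  by_cases hb : pvBlank N y x = true
  · rw [if_pos (hcond.mpr hb), if_pos hb]
  · rw [if_neg (fun hc => hb (hcond.mp hc)), if_neg hb]

-- ---- A side ----

def pvShape (n : Nat) (g : List (List String)) : Prop :=
  g.length = n ∧ ∀ (i : Nat) (h : i < g.length), g[i].length = n

-- the pointwise effect of one pass on one cell
def pvApp (cur : Int) (y x : Nat) (s : String) : String :=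
  if ((s == "*" && (PySem.Int.mod (y : Int) cur == 1 && PySem.Int.mod (x : Int) cur == 1))
      || (PySem.Int.mod (PySem.Int.floordiv (y : Int) cur) 3 == 1
          && PySem.Int.mod (PySem.Int.floordiv (x : Int) cur) 3 == 1)) then " " else s

theorem pv_shape_modify (n : Nat) (g : List (List String)) (y x : Nat) (h : pvShape n g) :
    pvShape n (g.modify y (fun row => row.set x " ")) := by
  obtain ⟨h1, h2⟩ := h
  refine ⟨by simpa using h1, ?_⟩
  intro i hi
  rw [List.length_modify] at hi
  rw [List.getElem_modify]
  split
  · rw [List.length_set]; exact h2 i hi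
  · exact h2 i hi

theorem pv_gridGet_modify (n : Nat) (g : List (List String)) (y x : Nat)
    (h : pvShape n g) (hy : y < n) (hx : x < n) (y' x' : Nat) :
    pvGridGet (g.modify y (fun row => row.set x " ")) y' x'
      = if y' = y ∧ x' = x then " " else pvGridGet g y' x' := by
  obtain ⟨h1, h2⟩ := h
  unfold pvGridGet
  simp only [List.getD_eq_getElem?_getD, List.getElem?_modify]
  by_cases hyy : y = y'
  · subst hyy
    have hylen : y < g.length := h1 ▸ hy
    have hrow : g[y]? = some g[y] := List.getElem?_eq_getElem hylen
    rw [hrow]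
    have hrl : x < (g[y]).length := by rw [h2 y hylen]; exact hx
    by_cases hxx : x = x'
    · subst hxx
      simp [List.getElem?_set, hrl]
    · rw [if_neg (fun hc => hxx hc.2.symm)]
      simp [List.getElem?_set_ne hxx]
  · have hne : ¬(y' = y ∧ x' = x) := fun hc => hyy hc.1.symm
    rw [if_neg hne]
    simp [hyy]

theorem pv_inner_fold (n : Nat) (cur : Int) (y : Nat) (hy : y < n) :
    ∀ (xs : List Nat), xs.Nodup → (∀ x ∈ xs, x < n) → ∀ (g : List (List String)), pvShape n g →
      pvShape n (xs.foldl (pvInner cur y) g)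
      ∧ ∀ (y' x' : Nat), pvGridGet (xs.foldl (pvInner cur y) g) y' x'
          = if y' = y ∧ x' ∈ xs then pvApp cur y x' (pvGridGet g y x') else pvGridGet g y' x' := by
  intro xs
  induction xs with
  | nil => intro _ _ g hg; exact ⟨hg, fun y' x' => by simp⟩
  | cons x xs ih =>
    intro hnd hlt g hg
    obtain ⟨hndx, hndxs⟩ := List.nodup_cons.mp hnd
    have hxn : x < n := hlt x (by simp)
    -- the one-step grid
    set g1 := pvInner cur y g x with hg1def
    have hg1shape : pvShape n g1 := by
      rw [hg1def]; unfold pvInner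
      split
      · exact pv_shape_modify n g y x hg
      · exact hg
    have hg1get : ∀ (y' x' : Nat), pvGridGet g1 y' x'
        = if y' = y ∧ x' = x then pvApp cur y x (pvGridGet g y x) else pvGridGet g y' x' := by
      intro y' x'
      rw [hg1def]; unfold pvInner pvApp
      split
      · rw [pv_gridGet_modify n g y x hg hy hxn]
      · split
        · rename_i hyx; rw [hyx.1, hyx.2]
        · rfl
    obtain ⟨ihs, ihg⟩ := ih hndxs (fun a ha => hlt a (by simp [ha])) g1 hg1shape
    refine ⟨by simpa using ihs, ?_⟩
    intro y' x'
    rw [List.foldl_cons, ← hg1def, ihg]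
    by_cases hyy : y' = y
    · subst hyy
      by_cases hmem : x' ∈ xs
      · -- decided later in the fold; its input cell in g1 equals the one in g since x' ≠ x
        have hxx : x' ≠ x := fun h => hndx (h ▸ hmem)
        rw [if_pos ⟨rfl, hmem⟩, if_pos ⟨rfl, by simp [hmem]⟩, hg1get]
        simp [hxx]
      · by_cases hxx : x' = x
        · subst hxx
          rw [if_neg (by simp [hmem]), if_pos ⟨rfl, by simp⟩, hg1get, if_pos ⟨rfl, rfl⟩]
        · rw [if_neg (by simp [hmem, hxx]), if_neg (by simp [hmem, hxx]), hg1get,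
              if_neg (by simp [hxx])]
    · rw [if_neg (by simp [hyy]), if_neg (by simp [hyy]), hg1get, if_neg (by simp [hyy])]

theorem pv_pass_get (n : Nat) (cur : Int) (g : List (List String)) (hg : pvShape n g) :
    pvShape n (pvPass n cur g)
    ∧ ∀ (y' x' : Nat), pvGridGet (pvPass n cur g) y' x'
        = if y' < n ∧ x' < n then pvApp cur y' x' (pvGridGet g y' x') else pvGridGet g y' x' := by
  unfold pvPass
  suffices h : ∀ (ys : List Nat), ys.Nodup → (∀ y ∈ ys, y < n) → ∀ g, pvShape n g →
      pvShape n (ys.foldl (fun g y => (List.range n).foldl (pvInner cur y) g) g)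
      ∧ ∀ (y' x' : Nat), pvGridGet (ys.foldl (fun g y => (List.range n).foldl (pvInner cur y) g) g) y' x'
          = if y' ∈ ys ∧ x' < n then pvApp cur y' x' (pvGridGet g y' x') else pvGridGet g y' x' by
    obtain ⟨hs, hget⟩ := h (List.range n) (List.nodup_range) (fun y hy => List.mem_range.mp hy) g hg
    exact ⟨hs, fun y' x' => by rw [hget]; simp [List.mem_range]⟩
  intro ys
  induction ys with
  | nil => intro _ _ g hg; exact ⟨hg, fun y' x' => by simp⟩
  | cons y ys ih =>
    intro hnd hlt g hg
    obtain ⟨hndy, hndys⟩ := List.nodup_cons.mp hnd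
    have hyn : y < n := hlt y (by simp)
    obtain ⟨h1s, h1g⟩ := pv_inner_fold n cur y hyn (List.range n) List.nodup_range
      (fun a ha => List.mem_range.mp ha) g hg
    set g1 := (List.range n).foldl (pvInner cur y) g with hg1
    obtain ⟨ihs, ihg⟩ := ih hndys (fun a ha => hlt a (by simp [ha])) g1 h1s
    refine ⟨by simpa using ihs, ?_⟩
    intro y' x'
    rw [List.foldl_cons, ← hg1, ihg]
    by_cases hyy : y' = y
    · subst hyy
      have hyys : y' ∉ ys := hndy
      by_cases hxx : x' < n
      · rw [if_neg (fun h => hyys h.1), h1g,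
            if_pos ⟨rfl, List.mem_range.mpr hxx⟩, if_pos ⟨by simp, hxx⟩]
      · rw [if_neg (fun h => hxx h.2), if_neg (fun h => hxx h.2), h1g,
            if_neg (fun h => hxx (List.mem_range.mp h.2))]
    · have hb : pvGridGet g1 y' x' = pvGridGet g y' x' := by
        rw [h1g, if_neg (fun h => hyy h.1)]
      simp [hb, List.mem_cons, hyy]

theorem pvApp_blankIn (cur : Int) (y x : Nat) : pvApp cur y x " " = " " := by
  unfold pvApp; split <;> rfl

theorem pvApp_star (cur : Int) (y x : Nat) :
    pvApp cur y x "*" = if pvBC cur y x then " " else "*" := by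
  unfold pvApp pvBC pvP pvQ
  simp

theorem pvChain_pos {c : Int} (h : 1 < c) : pvChain c = c :: pvChain (PySem.Int.floordiv c 3) := by
  rw [pvChain, dif_pos h]

theorem pvChain_neg {c : Int} (h : ¬ 1 < c) : pvChain c = [] := by
  rw [pvChain, dif_neg h]

theorem pv_loop_get (n : Nat) : ∀ (m : Nat) (cur : Int) (g : List (List String)) (b : Nat → Nat → Bool),
    cur.toNat = m →
    pvShape n g → (∀ y x, y < n → x < n → pvGridGet g y x = (if b y x then " " else "*")) →
    pvShape n (pvLoop n cur g)
    ∧ ∀ y x, y < n → x < n → pvGridGet (pvLoop n cur g) y x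
        = if (b y x || (pvChain cur).any (fun c => pvBC c y x)) then " " else "*" := by
  intro m
  induction m using Nat.strong_induction_on with
  | _ m ih =>
    intro cur g b hm hs hg
    by_cases hcur : 1 < cur
    · rw [pvLoop, dif_pos hcur]
      have hlt : (PySem.Int.floordiv cur 3).toNat < m := hm ▸ pv_fdiv3_toNat_lt cur hcur
      obtain ⟨hps, hpg⟩ := pv_pass_get n cur g hs
      have hg' : ∀ y x, y < n → x < n →
          pvGridGet (pvPass n cur g) y x = (if (b y x || pvBC cur y x) then " " else "*") := by
        intro y x hy hx
        rw [hpg, if_pos ⟨hy, hx⟩, hg y x hy hx]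
        by_cases hb : b y x
        · simp [hb, pvApp_blankIn]
        · simp [hb, pvApp_star]
      obtain ⟨hls, hlg⟩ := ih _ hlt (PySem.Int.floordiv cur 3) (pvPass n cur g)
        (fun y x => b y x || pvBC cur y x) rfl hps hg'
      refine ⟨hls, ?_⟩
      intro y x hy hx
      rw [hlg y x hy hx, pvChain_pos hcur, List.any_cons]
      simp [Bool.or_assoc]
    · rw [pvLoop, dif_neg hcur, pvChain_neg hcur]
      exact ⟨hs, fun y x hy hx => by rw [hg y x hy hx]; simp⟩

theorem pv_gridGet_eq_getElem (g : List (List String)) (y x : Nat)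
    (hyl : y < g.length) (hxl : x < g[y].length) : pvGridGet g y x = g[y][x] := by
  unfold pvGridGet
  rw [show g.getD y [] = g[y] by
        rw [List.getD_eq_getElem?_getD, List.getElem?_eq_getElem hyl, Option.getD_some]]
  rw [List.getD_eq_getElem?_getD, List.getElem?_eq_getElem hxl, Option.getD_some]

theorem solve_eq_mk (N : Int) : solve N = pvMk N := by
  have hinit : pvShape N.toNat
      ((List.range N.toNat).map (fun _ => (List.range N.toNat).map (fun _ => ("*" : String)))) := by
    refine ⟨by simp, ?_⟩
    intro i hi
    simp
  have hinitget : ∀ y x, y < N.toNat → x < N.toNat →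
      pvGridGet ((List.range N.toNat).map (fun _ => (List.range N.toNat).map (fun _ => ("*" : String)))) y x
        = (if (false : Bool) then " " else "*") := by
    intro y x hy hx
    unfold pvGridGet
    rw [pv_getD_map_range _ _ _ _ hy, pv_getD_map_range _ _ _ _ hx]
    rfl
  obtain ⟨hs, hgget⟩ := pv_loop_get N.toNat N.toNat N
    ((List.range N.toNat).map (fun _ => (List.range N.toNat).map (fun _ => ("*" : String))))
    (fun _ _ => false) rfl hinit hinitget
  have hsolve : solve N = pvLoop N.toNat N
      ((List.range N.toNat).map (fun _ => (List.range N.toNat).map (fun _ => ("*" : String)))) := rfl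
  have hmk : pvMk N
      = (List.range N.toNat).map (fun y => (List.range N.toNat).map (fun x =>
          if pvBlank N y x then " " else "*")) := rfl
  rw [hsolve, hmk]
  apply List.ext_getElem
  · rw [hs.1, List.length_map, List.length_range]
  · intro y hy1 hy2
    have hyn : y < N.toNat := hs.1 ▸ hy1
    conv_rhs => rw [List.getElem_map, List.getElem_range]
    apply List.ext_getElem
    · rw [hs.2 y hy1, List.length_map, List.length_range]
    · intro x hx1 hx2
      have hxn : x < N.toNat := (hs.2 y hy1) ▸ hx1
      conv_rhs => rw [List.getElem_map, List.getElem_range]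
      rw [← pv_gridGet_eq_getElem _ _ _ hy1 hx1, hgget y x hyn hxn]
      simp [pvBlank]

-- ===== VERDICT (by name: the statement is the Claim_ definition above) =====
theorem solve_spec : Claim_equal_solve := by
  intro N _
  unfold Spec_solve
  rw [solve_eq_mk, solve_alt_eq_mk]
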